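-- pv_equiv track=rewrite | github.com/ngthanhtrung23/CompetitiveProgramming | codeforces/691/B.py | check
-- ===== SOURCE A (Python) =====
-- sym = "AHIMOTUVWXYovwx"
--
-- mir = {
--     'p': 'q',
--     'q': 'p',
--     'd': 'b',
--     'b': 'd',
-- }
--
-- def good(a, b):
--     if a in sym and a == b:
--         return True
--     if a in mir and mir[a] == b:
--         return True
--     return False
--
-- def check(s: str) -> bool:
--     for i in range(len(s)):
--         j = len(s) - i - 1
--         if i == j:
--             if not s[i] in sym:
--                 return False
--         if i != j:
--             if not good(s[i], s[j]):
--                 return False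
--     return True
-- ===== SOURCE B (Python) =====
-- sym = "AHIMOTUVWXYovwx"
--
-- mir = {
--     'p': 'q',
--     'q': 'p',
--     'd': 'b',
--     'b': 'd',
-- }
--
-- def check(s: str) -> bool:
--     m = {c: c for c in sym}
--     m.update(mir)
--     return all(c in m for c in s) and ''.join(m[c] for c in s) == s[::-1]
-- ===== Notes on version B (the rewrite author's own statement) =====
-- stated objective: alternative
-- what changed: Replaces A's index-pair loop with per-position middle-case guard and the good() helper by building one merged char map (sym identity + mir) and comparing the whole transformed string against the reversal in a single equality.
import Mathlib
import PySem

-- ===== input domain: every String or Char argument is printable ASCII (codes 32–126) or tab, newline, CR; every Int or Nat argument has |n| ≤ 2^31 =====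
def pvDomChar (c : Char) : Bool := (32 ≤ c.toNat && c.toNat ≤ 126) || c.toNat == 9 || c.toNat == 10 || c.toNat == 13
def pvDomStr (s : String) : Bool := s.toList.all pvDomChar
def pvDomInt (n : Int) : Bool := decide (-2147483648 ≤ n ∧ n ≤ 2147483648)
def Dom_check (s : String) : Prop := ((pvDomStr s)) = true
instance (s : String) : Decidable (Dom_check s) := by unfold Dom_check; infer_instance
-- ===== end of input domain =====

-- B builds one merged sym+mir char map and compares the fully transformed string to the
-- reversal in a single equality, instead of A's index-pair loop with a middle-case guard.


-- ===== PORT A =====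
def symA : List Char := "AHIMOTUVWXYovwx".toList

def mirA : PySem.Dict Char Char :=
  PySem.Dict.mk [('p', 'q'), ('q', 'p'), ('d', 'b'), ('b', 'd')]

def goodA (a b : Char) : Bool :=
  if symA.contains a && (a == b) then true
  else if mirA.contains a && ((mirA.get? a).getD ' ' == b) then true
  else false

-- the for-loop of A's check, with its early returns, as index recursion
def checkLoop (cs : List Char) (i : Nat) : Bool :=
  if i < cs.length then
    let j := cs.length - i - 1
    if (i == j) && !(symA.contains (cs.getD i ' ')) then false
    else if !(i == j) && !(goodA (cs.getD i ' ') (cs.getD j ' ')) then false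
    else checkLoop cs (i + 1)
  else true
termination_by cs.length - i

def check (s : String) : Bool := checkLoop s.toList 0

-- ===== PORT B =====
def symB : List Char := "AHIMOTUVWXYovwx".toList

def mirB : List (Char × Char) := [('p', 'q'), ('q', 'p'), ('d', 'b'), ('b', 'd')]

-- m = {c: c for c in sym}; m.update(mir)
def mB : PySem.Dict Char Char :=
  mirB.foldl (fun d p => d.insert p.1 p.2)
    (symB.foldl (fun d c => d.insert c c) (PySem.Dict.mk []))

-- all(c in m for c in s) and ''.join(m[c] for c in s) == s[::-1]
-- (m[c] never raises on the compared value: the `all` conjunct guards it; getD ' ' is exact there)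
def check_alt (s : String) : Bool :=
  s.toList.all (fun c => mB.contains c) &&
    (s.toList.map (fun c => (mB.get? c).getD ' ') == s.toList.reverse)

-- ===== PRECONDITION & SPEC =====
def Spec_check (s : String) (out : Bool) : Prop := out = check_alt s
instance (s : String) (out : Bool) : Decidable (Spec_check s out) := by unfold Spec_check; infer_instance

-- ===== CLAIM (what is proved, stated in full; the proofs are below) =====
def Claim_equal_check : Prop := ∀ (s : String), Dom_check s → Spec_check s (check s)

-- ===== LEMMAS AND PROOFS =====

theorem mB_lit : mB = PySem.Dict.mk [('A','A'),('H','H'),('I','I'),('M','M'),('O','O'),('T','T'),('U','U'),('V','V'),('W','W'),('X','X'),('Y','Y'),('o','o'),('v','v'),('w','w'),('x','x'),('p','q'),('q','p'),('d','b'),('b','d')] := by decide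

-- the merged map agrees with good(): looking up a and comparing with b is exactly good a b
theorem mB_good (a b : Char) :
    (mB.contains a && ((mB.get? a).getD ' ' == b)) = goodA a b := by
  by_cases h : a = 'A' ∨ a = 'H' ∨ a = 'I' ∨ a = 'M' ∨ a = 'O' ∨ a = 'T' ∨ a = 'U' ∨ a = 'V' ∨ a = 'W' ∨ a = 'X' ∨ a = 'Y' ∨ a = 'o' ∨ a = 'v' ∨ a = 'w' ∨ a = 'x' ∨ a = 'p' ∨ a = 'q' ∨ a = 'd' ∨ a = 'b'
  · rcases h with h|h|h|h|h|h|h|h|h|h|h|h|h|h|h|h|h|h|h <;> subst h <;>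
      rw [mB_lit] <;>
      simp [goodA, symA, mirA, PySem.Dict.get?_mk_cons, PySem.Dict.contains_mk, Bool.beq_eq_decide_eq]
  · push Not at h
    obtain ⟨h1,h2,h3,h4,h5,h6,h7,h8,h9,h10,h11,h12,h13,h14,h15,h16,h17,h18,h19⟩ := h
    rw [mB_lit]
    simp [goodA, symA, mirA, PySem.Dict.get?_mk_cons, PySem.Dict.contains_mk,
      h1,h2,h3,h4,h5,h6,h7,h8,h9,h10,h11,h12,h13,h14,h15,
      Ne.symm h1, Ne.symm h2, Ne.symm h3, Ne.symm h4, Ne.symm h5, Ne.symm h6, Ne.symm h7,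
      Ne.symm h8, Ne.symm h9, Ne.symm h10, Ne.symm h11, Ne.symm h12, Ne.symm h13, Ne.symm h14,
      Ne.symm h15, Ne.symm h16, Ne.symm h17, Ne.symm h18, Ne.symm h19]

theorem goodA_self (a : Char) : goodA a a = symA.contains a := by
  by_cases h : a = 'p' ∨ a = 'q' ∨ a = 'd' ∨ a = 'b'
  · rcases h with h|h|h|h <;> subst h <;> decide
  · push Not at h
    obtain ⟨h1,h2,h3,h4⟩ := h
    simp [goodA, mirA, PySem.Dict.contains_mk,
      Ne.symm h1, Ne.symm h2, Ne.symm h3, Ne.symm h4]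

-- pointwise condition checked by A's loop at position k
def condA (cs : List Char) (k : Nat) : Bool :=
  let j := cs.length - k - 1
  if k == j then symA.contains (cs.getD k ' ')
  else goodA (cs.getD k ' ') (cs.getD j ' ')

set_option maxRecDepth 4096 in
theorem checkLoop_iff (cs : List Char) (d i : Nat) (hd : cs.length - i = d) :
    checkLoop cs i = true ↔ ∀ k, i ≤ k → k < cs.length → condA cs k = true := by
  induction d generalizing i with
  | zero =>
    rw [checkLoop]
    simp only [show ¬ i < cs.length by omega]
    constructor
    · intro _ k hik hk; omega
    · intro _; simp
  | succ d ih =>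
    have hi : i < cs.length := by omega
    rw [checkLoop]
    simp only [hi, if_pos]
    have hcond : condA cs i = true ↔
        ¬ ((i == cs.length - i - 1 && !symA.contains (cs.getD i ' ')) = true) ∧
        ¬ ((!(i == cs.length - i - 1) &&
            !goodA (cs.getD i ' ') (cs.getD (cs.length - i - 1) ' ')) = true) := by
      unfold condA
      by_cases he : i = cs.length - i - 1
      · have hb : (i == cs.length - i - 1) = true := by simpa using he
        simp [hb]
      · have hb : (i == cs.length - i - 1) = false := by simpa using he
        simp [hb]
    split_ifs with hc1 hc2
    · simp only [false_iff]
      intro hall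
      exact (hcond.mp (hall i le_rfl hi)).1 hc1
    · simp only [false_iff]
      intro hall
      exact (hcond.mp (hall i le_rfl hi)).2 hc2
    · rw [ih (i + 1) (by omega)]
      constructor
      · intro h k hik hk
        rcases Nat.eq_or_lt_of_le hik with he | hlt
        · exact he ▸ hcond.mpr ⟨hc1, hc2⟩
        · exact h k hlt hk
      · intro h k hik hk
        exact h k (by omega) hk

theorem condA_eq (cs : List Char) (k : Nat) :
    condA cs k = goodA (cs.getD k ' ') (cs.getD (cs.length - k - 1) ' ') := by
  unfold condA
  by_cases he : k = cs.length - k - 1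
  · have hb : (k == cs.length - k - 1) = true := by simpa using he
    simp only [hb, if_pos]
    rw [← he, goodA_self]
  · have hb : (k == cs.length - k - 1) = false := by simpa using he
    simp [hb]

theorem check_alt_iff (s : String) :
    check_alt s = true ↔ ∀ k, k < s.toList.length →
      (mB.contains (s.toList.getD k ' ') &&
        ((mB.get? (s.toList.getD k ' ')).getD ' ' ==
          s.toList.getD (s.toList.length - k - 1) ' ')) = true := by
  unfold check_alt
  simp only [Bool.and_eq_true, List.all_eq_true, beq_iff_eq]
  constructor
  · rintro ⟨hall, hmap⟩ k hk
    have hgd : s.toList.getD k ' ' = s.toList[k] := List.getD_eq_getElem _ _ hk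
    have hj : s.toList.length - k - 1 < s.toList.length := by omega
    have hgd2 : s.toList.getD (s.toList.length - k - 1) ' ' =
        s.toList[s.toList.length - k - 1] := List.getD_eq_getElem _ _ hj
    refine ⟨by rw [hgd]; exact hall _ (List.getElem_mem hk), ?_⟩
    have h2 : (s.toList.map (fun c => (mB.get? c).getD ' '))[k]'(by simpa using hk) =
        s.toList.reverse[k]'(by simpa using hk) := List.getElem_of_eq hmap _
    simp only [List.getElem_map, List.getElem_reverse] at h2
    rw [hgd, hgd2, h2]
    congr 1
    omega
  · intro h
    constructor
    · intro c hc
      obtain ⟨k, hk, rfl⟩ := List.mem_iff_getElem.mp hc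
      have := (h k hk).1
      rwa [List.getD_eq_getElem _ _ hk] at this
    · apply List.ext_getElem (by simp)
      intro i h1 h2
      simp only [List.getElem_map, List.getElem_reverse]
      have hi : i < s.toList.length := by simpa using h2
      have hj : s.toList.length - i - 1 < s.toList.length := by omega
      have := (h i hi).2
      rw [List.getD_eq_getElem _ _ hi, List.getD_eq_getElem _ _ hj] at this
      rw [this]
      congr 1
      omega

-- ===== VERDICT (by name: the statement is the Claim_ definition above) =====
theorem check_spec : Claim_equal_check := by
  intro s _
  unfold Spec_check check
  rw [Bool.eq_iff_iff, checkLoop_iff s.toList s.toList.length 0 (by omega), check_alt_iff]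
  constructor
  · intro h k hk
    rw [mB_good, ← condA_eq]
    exact h k (Nat.zero_le k) hk
  · intro h k _ hk
    rw [condA_eq, ← mB_good]
    exact h k hk
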